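-- pv_equiv track=rewrite | github.com/abelzhou2025/Baoyu | scripts/final_md_pipeline.py | image_keys
-- ===== SOURCE A (Python) =====
-- from typing import Dict, List, Tuple
--
-- def normalize_image_count(n: int) -> int:
--     return max(0, min(4, n))
--
-- def image_keys(image_count: int) -> List[str]:
--     c = normalize_image_count(image_count)
--     keys: List[str] = []
--     if c >= 1:
--         keys.append("cover")
--     for i in range(1, c):
--         keys.append(f"figure_{i}")
--     return keys
-- ===== SOURCE B (Python) =====
-- ALL_IMAGE_KEYS = ["cover", "figure_1", "figure_2", "figure_3"]
--
-- def normalize_image_count(n: int) -> int: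
--     return max(0, min(4, n))
--
-- def image_keys(image_count: int) -> list:
--     return ALL_IMAGE_KEYS[:normalize_image_count(image_count)]
-- ===== Notes on version B (the rewrite author's own statement) =====
-- stated objective: simpler
-- what changed: Replaces the conditional append plus f-string loop with a precomputed table of all four keys sliced by the clamped count.
import Mathlib
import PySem

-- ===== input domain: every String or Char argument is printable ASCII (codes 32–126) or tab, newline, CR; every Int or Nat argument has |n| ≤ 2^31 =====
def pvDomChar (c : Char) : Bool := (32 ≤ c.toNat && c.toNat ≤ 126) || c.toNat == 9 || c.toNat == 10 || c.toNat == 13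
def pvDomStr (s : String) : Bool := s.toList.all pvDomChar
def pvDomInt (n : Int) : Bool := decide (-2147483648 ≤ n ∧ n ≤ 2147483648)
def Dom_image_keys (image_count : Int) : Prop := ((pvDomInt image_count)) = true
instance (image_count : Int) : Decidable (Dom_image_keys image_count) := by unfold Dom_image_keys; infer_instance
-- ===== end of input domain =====

-- B replaces the conditional append plus f-string loop with a precomputed table sliced by the clamped count (simpler).


-- ===== PORT A =====
def normalize_image_count (n : Int) : Int := max 0 (min 4 n)

def image_keys (image_count : Int) : List String :=
  let c := normalize_image_count image_count
  let keys : List String := []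
  let keys := if c ≥ 1 then keys ++ ["cover"] else keys
  (PySem.List.pyRange 1 c 1).foldl (fun keys i => keys ++ ["figure_" ++ PySem.Int.toStr i]) keys

-- ===== PORT B =====
def allImageKeys : List String := ["cover", "figure_1", "figure_2", "figure_3"]

def normalize_image_count_b (n : Int) : Int := max 0 (min 4 n)

def image_keys_alt (image_count : Int) : List String :=
  PySem.List.slice allImageKeys none (some (normalize_image_count_b image_count))

-- ===== PRECONDITION & SPEC =====
def Spec_image_keys (image_count : Int) (out : List String) : Prop := out = image_keys_alt image_count
instance (image_count : Int) (out : List String) : Decidable (Spec_image_keys image_count out) := by unfold Spec_image_keys; infer_instance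

-- ===== CLAIM (what is proved, stated in full; the proofs are below) =====
def Claim_equal_image_keys : Prop := ∀ (image_count : Int), Dom_image_keys image_count → Spec_image_keys image_count (image_keys image_count)

-- ===== LEMMAS AND PROOFS =====

-- Both results are determined by the clamped count c = max 0 (min 4 n), which is one of 0..4.
theorem image_keys_eq (n : Int) : image_keys n = image_keys_alt n := by
  have hc : max 0 (min 4 n) = 0 ∨ max 0 (min 4 n) = 1 ∨ max 0 (min 4 n) = 2 ∨
      max 0 (min 4 n) = 3 ∨ max 0 (min 4 n) = 4 := by omega
  unfold image_keys image_keys_alt normalize_image_count normalize_image_count_b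
  rcases hc with h | h | h | h | h <;> rw [h] <;> decide

-- ===== VERDICT (by name: the statement is the Claim_ definition above) =====
theorem image_keys_spec : Claim_equal_image_keys := by
  intro n _
  exact image_keys_eq n
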